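-- pv_equiv track=rewrite | github.com/minminlittleshrimp/helix | error_correction.py | _int_to_quaternary
-- ===== SOURCE A (Python) =====
-- from typing import List, Optional, Tuple
--
-- def _int_to_quaternary(value: int, min_length: int = 1) -> List[int]:
--     """
--     Convert integer to quaternary representation.
--
--     Args:
--         value: Integer to convert
--         min_length: Minimum length of output
--
--     Returns:
--         List of quaternary digits
--     """
--     if value == 0:
--         result = [0]
--     else:
--         result = []
--         temp = value
--         while temp > 0:
--             result.append(temp % 4)
--             temp //= 4
--         result.reverse()
--
--     # Pad to minimum length
--     while len(result) < min_length:
--         result.insert(0, 0)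
--
--     return result
-- ===== SOURCE B (Python) =====
-- def _int_to_quaternary(value: int, min_length: int = 1):
--     # Count base-4 digits, extract each digit positionally (high place first),
--     # then prepend the zero padding as a block.
--     n, t = 0, value
--     while t > 0:
--         n += 1
--         t //= 4
--     if value == 0:
--         n = 1
--     length = max(n, min_length)
--     digits = [((value // 4 ** i) % 4) if value > 0 else 0
--               for i in range(n - 1, -1, -1)]
--     return [0] * (length - n) + digits
-- ===== Notes on version B (the rewrite author's own statement) =====
-- stated objective: faster
-- what changed: Replaces accumulate-then-reverse plus per-element insert(0,0) padding with a digit-count pass followed by direct high-to-low positional digit extraction and a single block of padding zeros.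
import Mathlib
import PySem

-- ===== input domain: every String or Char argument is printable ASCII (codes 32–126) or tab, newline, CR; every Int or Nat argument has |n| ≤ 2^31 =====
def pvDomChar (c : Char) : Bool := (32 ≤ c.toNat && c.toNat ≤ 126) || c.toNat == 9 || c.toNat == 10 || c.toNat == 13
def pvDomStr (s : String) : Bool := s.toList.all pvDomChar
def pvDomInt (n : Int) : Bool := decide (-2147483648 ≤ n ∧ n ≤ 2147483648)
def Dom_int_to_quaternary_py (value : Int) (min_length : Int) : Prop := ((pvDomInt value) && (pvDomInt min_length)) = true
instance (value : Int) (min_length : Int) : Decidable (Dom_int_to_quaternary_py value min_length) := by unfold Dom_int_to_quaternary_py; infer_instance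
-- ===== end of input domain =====

-- B replaces A's accumulate-then-reverse plus per-element insert(0,0) padding by a digit
-- count, direct high-to-low positional digit extraction, and one block of padding zeros
-- (removes the quadratic front-insertion; measured faster on large padding).

-- ===== PORT A =====
-- the `while temp > 0` accumulation loop (appends low digits at the end of `result`)
def pvALoop (temp : Int) (result : List Int) : List Int :=
  if _h : temp > 0 then
    pvALoop (PySem.Int.floordiv temp 4) (result ++ [PySem.Int.mod temp 4])
  else result
termination_by temp.toNat
decreasing_by
  rw [PySem.Int.floordiv_eq_ediv_of_pos (by omega)]; omega

-- the `while len(result) < min_length: result.insert(0, 0)` padding loop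
def pvAPad (result : List Int) (min_length : Int) : List Int :=
  if _h : (result.length : Int) < min_length then pvAPad (0 :: result) min_length
  else result
termination_by (min_length - result.length).toNat
decreasing_by
  simp only [List.length_cons]; omega

def int_to_quaternary_py (value : Int) (min_length : Int) : List Int :=
  let result := if value = 0 then [0] else (pvALoop value []).reverse
  pvAPad result min_length

-- ===== PORT B =====
-- `while t > 0: n += 1; t //= 4` — count the base-4 digits
def pvBCount (t : Int) : Int :=
  if h : t > 0 then 1 + pvBCount (PySem.Int.floordiv t 4) else 0
termination_by t.toNat
decreasing_by
  rw [PySem.Int.floordiv_eq_ediv_of_pos (by omega)]; omega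

-- the comprehension over range(length-1, -1, -1)
def pvBBuild (value : Int) (i : Int) : List Int :=
  if h : i > -1 then
    (if value > 0 then PySem.Int.mod (PySem.Int.floordiv value ((4:Int) ^ i.toNat)) 4 else 0)
      :: pvBBuild value (i - 1)
  else []
termination_by (i + 1).toNat
decreasing_by
  omega

def int_to_quaternary_py_alt (value : Int) (min_length : Int) : List Int :=
  let n := if value = 0 then 1 else pvBCount value
  let length := max n min_length
  List.replicate (length - n).toNat 0 ++ pvBBuild value (n - 1)

-- ===== PRECONDITION & SPEC =====
def Spec_int_to_quaternary_py (value : Int) (min_length : Int) (out : List Int) : Prop := out = int_to_quaternary_py_alt value min_length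
instance (value : Int) (min_length : Int) (out : List Int) : Decidable (Spec_int_to_quaternary_py value min_length out) := by unfold Spec_int_to_quaternary_py; infer_instance

-- ===== CLAIM (what is proved, stated in full; the proofs are below) =====
def Claim_equal_int_to_quaternary_py : Prop := ∀ (value : Int) (min_length : Int), Dom_int_to_quaternary_py value min_length → Spec_int_to_quaternary_py value min_length (int_to_quaternary_py value min_length)

-- ===== LEMMAS AND PROOFS =====

-- A's loop with an accumulator is the accumulator followed by the loop from scratch
theorem pvALoop_acc (temp : Int) (result : List Int) :
    pvALoop temp result = result ++ pvALoop temp [] := by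
  by_cases h : temp > 0
  · rw [pvALoop, dif_pos h,
        pvALoop_acc (PySem.Int.floordiv temp 4) (result ++ [PySem.Int.mod temp 4])]
    conv_rhs => rw [pvALoop, dif_pos h,
        pvALoop_acc (PySem.Int.floordiv temp 4) ([] ++ [PySem.Int.mod temp 4])]
    simp
  · rw [pvALoop, dif_neg h, pvALoop, dif_neg h]; simp
termination_by temp.toNat
decreasing_by
  all_goals rw [PySem.Int.floordiv_eq_ediv_of_pos (by norm_num)]; omega

theorem pvALoop_pos {temp : Int} (h : temp > 0) :
    pvALoop temp [] = PySem.Int.mod temp 4 :: pvALoop (PySem.Int.floordiv temp 4) [] := by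
  rw [pvALoop, dif_pos h, pvALoop_acc]; simp

theorem pvALoop_nonpos {temp : Int} (h : ¬ temp > 0) : pvALoop temp [] = [] := by
  rw [pvALoop, dif_neg h]

theorem pvBCount_nonneg (t : Int) : 0 ≤ pvBCount t := by
  by_cases h : t > 0
  · rw [pvBCount, dif_pos h]
    have := pvBCount_nonneg (PySem.Int.floordiv t 4)
    omega
  · rw [pvBCount, dif_neg h]
termination_by t.toNat
decreasing_by
  rw [PySem.Int.floordiv_eq_ediv_of_pos (by norm_num)]; omega

theorem pvALoop_length (t : Int) : ((pvALoop t []).length : Int) = pvBCount t := by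
  by_cases h : t > 0
  · rw [pvALoop_pos h, pvBCount, dif_pos h]
    simp only [List.length_cons]
    have := pvALoop_length (PySem.Int.floordiv t 4)
    push_cast
    omega
  · rw [pvALoop_nonpos h, pvBCount, dif_neg h]; simp
termination_by t.toNat
decreasing_by
  rw [PySem.Int.floordiv_eq_ediv_of_pos (by norm_num)]; omega

-- proof-side descending digit list: pvAsc v n = [d_{n-1}, …, d_1, d_0], d_j = (v // 4^j) % 4
def pvAsc (v : Int) : Nat → List Int
  | 0 => []
  | n + 1 => PySem.Int.mod (PySem.Int.floordiv v ((4:Int) ^ n)) 4 :: pvAsc v n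

theorem pvBBuild_eq_pvAsc {v : Int} (hv : v > 0) (i : Int) (hi : -1 ≤ i) :
    pvBBuild v i = pvAsc v (i + 1).toNat := by
  by_cases h : i > -1
  · rw [pvBBuild, dif_pos h, if_pos hv, pvBBuild_eq_pvAsc hv (i - 1) (by omega)]
    have h1 : (i + 1).toNat = (i - 1 + 1).toNat + 1 := by omega
    have h2 : (i - 1 + 1).toNat = i.toNat := by omega
    rw [h1, h2, pvAsc]
  · rw [pvBBuild, dif_neg h]
    have : (i + 1).toNat = 0 := by omega
    rw [this, pvAsc]
termination_by (i + 1).toNat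
decreasing_by
  omega

theorem pvBBuild_nonpos {v : Int} (hv : ¬ v > 0) (i : Int) :
    pvBBuild v i = List.replicate (i + 1).toNat 0 := by
  by_cases h : i > -1
  · rw [pvBBuild, dif_pos h, if_neg hv, pvBBuild_nonpos hv (i - 1)]
    have h1 : (i + 1).toNat = (i - 1 + 1).toNat + 1 := by omega
    rw [h1, List.replicate_succ]
  · rw [pvBBuild, dif_neg h]
    have : (i + 1).toNat = 0 := by omega
    rw [this, List.replicate]
termination_by (i + 1).toNat
decreasing_by
  omega

-- floordiv composes over the power of the base
theorem pv_fd_fd (v : Int) (n : Nat) :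
    PySem.Int.floordiv (PySem.Int.floordiv v 4) ((4:Int) ^ n) =
      PySem.Int.floordiv v ((4:Int) ^ (n + 1)) := by
  have hp : (0:Int) < (4:Int) ^ n := by positivity
  have hp1 : (0:Int) < (4:Int) ^ (n + 1) := by positivity
  simp only [PySem.Int.floordiv_eq_ediv_of_pos (show (0:Int) < 4 by norm_num),
      PySem.Int.floordiv_eq_ediv_of_pos hp, PySem.Int.floordiv_eq_ediv_of_pos hp1]
  have h2 : (4:Int) ^ (n + 1) = 4 * 4 ^ n := by ring
  rw [h2, ← Int.ediv_ediv_of_nonneg (by norm_num : (0:Int) ≤ 4)]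

-- peel pvAsc at the low-digit (last) end
theorem pvAsc_snoc (v : Int) (n : Nat) :
    pvAsc v (n + 1) = pvAsc (PySem.Int.floordiv v 4) n ++ [PySem.Int.mod v 4] := by
  induction n with
  | zero =>
    rw [pvAsc, pvAsc, pvAsc]
    simp only [pow_zero, List.nil_append]
    rw [PySem.Int.floordiv_eq_ediv_of_pos (by norm_num : (0:Int) < 1), Int.ediv_one]
  | succ n ih =>
    rw [pvAsc, ih, pvAsc, pv_fd_fd]
    simp

theorem pvAsc_zero (n : Nat) : pvAsc 0 n = List.replicate n 0 := by
  induction n with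
  | zero => rfl
  | succ n ih =>
    rw [pvAsc, ih, List.replicate_succ]
    have hp : (0:Int) < (4:Int) ^ n := by positivity
    rw [PySem.Int.floordiv_eq_ediv_of_pos hp, Int.zero_ediv,
        PySem.Int.mod_eq_emod_of_pos (by norm_num)]
    simp

-- main bridge: for 0 ≤ v and n at least the digit count, positional extraction equals
-- A's (reversed) digit list padded in front with zeros
theorem pvAsc_eq_pad (v : Int) (hv : 0 ≤ v) (n : Nat) (hn : pvBCount v ≤ (n : Int)) :
    pvAsc v n = List.replicate (n - (pvALoop v []).length) 0 ++ (pvALoop v []).reverse := by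
  by_cases hpos : v > 0
  · have hc1 : pvBCount v = 1 + pvBCount (PySem.Int.floordiv v 4) := by
      rw [pvBCount, dif_pos hpos]
    have hnn := pvBCount_nonneg (PySem.Int.floordiv v 4)
    obtain ⟨m, rfl⟩ : ∃ m, n = m + 1 := by
      cases n with
      | zero => exfalso; push_cast at hn; omega
      | succ m => exact ⟨m, rfl⟩
    have hv' : 0 ≤ PySem.Int.floordiv v 4 := by
      rw [PySem.Int.floordiv_eq_ediv_of_pos (by norm_num)]; omega
    have ih := pvAsc_eq_pad (PySem.Int.floordiv v 4) hv' m (by push_cast at hn; omega)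
    rw [pvAsc_snoc, ih, pvALoop_pos hpos]
    have hlen := pvALoop_length (PySem.Int.floordiv v 4)
    simp only [List.reverse_cons, List.length_cons]
    have heq : m + 1 - ((pvALoop (PySem.Int.floordiv v 4) []).length + 1)
         = m - (pvALoop (PySem.Int.floordiv v 4) []).length := by omega
    rw [heq, List.append_assoc]
  · have : v = 0 := by omega
    subst this
    rw [pvAsc_zero, pvALoop_nonpos hpos]
    simp
termination_by v.toNat
decreasing_by
  rw [PySem.Int.floordiv_eq_ediv_of_pos (by norm_num)]; omega

-- A's padding loop prepends exactly the missing zeros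
theorem pvAPad_eq (result : List Int) (min_length : Int) :
    pvAPad result min_length
      = List.replicate (min_length - result.length).toNat 0 ++ result := by
  by_cases h : (result.length : Int) < min_length
  · rw [pvAPad, dif_pos h, pvAPad_eq (0 :: result) min_length]
    simp only [List.length_cons]
    have h1 : (min_length - result.length).toNat
            = (min_length - ((result.length : Int) + 1)).toNat + 1 := by omega
    rw [h1, List.replicate_succ']
    simp
  · rw [pvAPad, dif_neg h]
    have : (min_length - result.length).toNat = 0 := by omega
    rw [this, List.replicate, List.nil_append]
termination_by (min_length - result.length).toNat
decreasing_by
  simp only [List.length_cons]; push_cast; omega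

-- ===== VERDICT (by name: the statement is the Claim_ definition above) =====
theorem int_to_quaternary_py_spec : Claim_equal_int_to_quaternary_py := by
  intro value min_length _
  unfold Spec_int_to_quaternary_py int_to_quaternary_py int_to_quaternary_py_alt
  dsimp only
  by_cases h0 : value = 0
  · subst h0
    rw [if_pos rfl, if_pos rfl, pvAPad_eq, pvBBuild_nonpos (by omega)]
    have e1 : ((1:Int) - 1 + 1).toNat = 1 := by omega
    have e2 : List.replicate 1 (0:Int) = [0] := rfl
    rw [e1, e2]
    congr 2
    have e3 : ([0] : List Int).length = 1 := rfl
    rw [e3]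
    omega
  · rw [if_neg h0, if_neg h0]
    by_cases hpos : value > 0
    · have hc1 : pvBCount value = 1 + pvBCount (PySem.Int.floordiv value 4) := by
        rw [pvBCount, dif_pos hpos]
      have hnn := pvBCount_nonneg (PySem.Int.floordiv value 4)
      have hlen := pvALoop_length value
      rw [pvAPad_eq, pvBBuild_eq_pvAsc hpos _ (by omega),
          pvAsc_eq_pad value (by omega) _ (by omega)]
      have e1 : ((pvBCount value - 1 + 1).toNat : Int) = pvBCount value := by omega
      have e2 : (pvBCount value - 1 + 1).toNat - (pvALoop value []).length = 0 := by omega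
      rw [e2, List.replicate, List.nil_append]
      congr 2
      simp only [List.length_reverse]
      omega
    · -- value < 0: both sides are a run of zeros of length max(0, min_length)
      have hc : pvBCount value = 0 := by rw [pvBCount, dif_neg hpos]
      rw [pvAPad_eq, pvALoop_nonpos hpos, hc, pvBBuild_nonpos hpos]
      have e1 : ((0:Int) - 1 + 1).toNat = 0 := by omega
      rw [e1]
      simp only [List.reverse_nil, List.length_nil, List.append_nil, List.replicate]
      congr 1
      omega
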